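-- pv_equiv track=rewrite | github.com/Onkar-K-Mane/Classic-Cipher-Project | ciphers/rail_fence.py | _traverse_fence
-- ===== SOURCE A (Python) =====
-- def _traverse_fence(height: int, length: int) -> list[tuple[int, int]]:
--     """Generate zigzag coordinates for rail fence traversal."""
--     rail = 0
--     going_down = True
--     coords = []
--
--     for col in range(length):
--         coords.append((rail, col))
--         if rail == 0:
--             going_down = True
--         elif rail == height - 1:
--             going_down = False
--
--         rail += 1 if going_down else -1
--
--     return coords
-- ===== SOURCE B (Python) =====
-- def _traverse_fence(height: int, length: int) -> list[tuple[int, int]]: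
--     """Generate zigzag coordinates for rail fence traversal (closed form)."""
--     if height <= 1:
--         # A single rail (or degenerate fence): everything stays on rail 0.
--         return [(0, col) for col in range(length)]
--     cycle = 2 * (height - 1)
--     coords = []
--     for col in range(length):
--         pos = col % cycle
--         coords.append((pos if pos < height else cycle - pos, col))
--     return coords
-- ===== Notes on version B (the rewrite author's own statement) =====
-- stated objective: alternative
-- what changed: Replaces the stateful bounce simulation (rail/going_down carried across iterations) by a per-column closed form rail = pos if pos < height else 2*(height-1)-pos with pos = col % (2*(height-1)).
-- intended difference: For height at most 1 with length at least 2, A's direction flip never fires so it returns rail index equal to the column number, walking off the fence, while B keeps every column on rail 0, the intended layout for a one-rail (or degenerate) fence. — e.g. on _traverse_fence(1, 2): A returns [(0, 0), (1, 1)], B returns [(0, 0), (0, 1)]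
import Mathlib
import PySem

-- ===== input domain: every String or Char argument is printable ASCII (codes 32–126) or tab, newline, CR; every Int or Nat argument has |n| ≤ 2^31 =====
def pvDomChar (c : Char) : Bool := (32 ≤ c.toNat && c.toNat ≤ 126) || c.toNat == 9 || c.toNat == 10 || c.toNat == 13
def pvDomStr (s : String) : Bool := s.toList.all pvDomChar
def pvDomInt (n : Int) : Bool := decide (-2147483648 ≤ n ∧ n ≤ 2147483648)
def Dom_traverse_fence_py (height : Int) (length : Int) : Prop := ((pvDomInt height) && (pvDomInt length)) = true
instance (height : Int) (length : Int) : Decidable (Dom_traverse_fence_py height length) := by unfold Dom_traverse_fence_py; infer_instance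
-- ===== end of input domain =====

-- B replaces the stateful bounce simulation by a per-column closed-form rail (alternative
-- algorithm, same O(length) cost); for height <= 1 B keeps every column on rail 0 where A
-- returns rails that leave the fence (stated as D_ below).


-- ===== PORT A =====
-- loop body of A's for-loop: state = (rail, going_down, coords)
def pvStepA (height : Int) (s : Int × Bool × List (Int × Int)) (col : Int) :
    Int × Bool × List (Int × Int) :=
  let rail := s.1
  let coords := s.2.2 ++ [(rail, col)]
  let going_down := if rail = 0 then true else if rail = height - 1 then false else s.2.1
  (rail + (if going_down then 1 else -1), going_down, coords)

def traverse_fence_py (height : Int) (length : Int) : List (Int × Int) :=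
  ((PySem.List.pyRange 0 length 1).foldl (pvStepA height) (0, true, [])).2.2

-- ===== PORT B =====
def traverse_fence_py_alt (height : Int) (length : Int) : List (Int × Int) :=
  if height ≤ 1 then
    (PySem.List.pyRange 0 length 1).map (fun col => (0, col))
  else
    let cycle := 2 * (height - 1)
    (PySem.List.pyRange 0 length 1).map (fun col =>
      let pos := PySem.Int.mod col cycle
      ((if pos < height then pos else cycle - pos), col))

-- ===== PRECONDITION & SPEC =====
-- For height ≤ 1 and length ≥ 2, A's direction flip never fires so it returns rail index
-- equal to the column number, walking off the fence, while B keeps every column on rail 0,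
-- the intended layout for a one-rail (or degenerate) fence.
def D_traverse_fence_py (height : Int) (length : Int) : Prop := height ≤ 1 ∧ 2 ≤ length
instance (height : Int) (length : Int) : Decidable (D_traverse_fence_py height length) := by unfold D_traverse_fence_py; infer_instance

def Spec_traverse_fence_py (height : Int) (length : Int) (out : List (Int × Int)) : Prop := ¬ D_traverse_fence_py height length → out = traverse_fence_py_alt height length
instance (height : Int) (length : Int) (out : List (Int × Int)) : Decidable (Spec_traverse_fence_py height length out) := by unfold Spec_traverse_fence_py; infer_instance

def pvDiffWitness_traverse_fence_py : Int × Int := (1, 2)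
def pvDiffWitnessOut_traverse_fence_py : (List (Int × Int)) × (List (Int × Int)) :=
  ([(0, 0), (1, 1)], [(0, 0), (0, 1)])

-- ===== CLAIM (what is proved, stated in full; the proofs are below) =====
def Claim_unchanged_traverse_fence_py : Prop := ∀ (height : Int) (length : Int), Dom_traverse_fence_py height length → Spec_traverse_fence_py height length (traverse_fence_py height length)
def Claim_changed_traverse_fence_py : Prop := Dom_traverse_fence_py (pvDiffWitness_traverse_fence_py.1) (pvDiffWitness_traverse_fence_py.2) ∧ D_traverse_fence_py (pvDiffWitness_traverse_fence_py.1) (pvDiffWitness_traverse_fence_py.2) ∧ traverse_fence_py (pvDiffWitness_traverse_fence_py.1) (pvDiffWitness_traverse_fence_py.2) = pvDiffWitnessOut_traverse_fence_py.1 ∧ traverse_fence_py_alt (pvDiffWitness_traverse_fence_py.1) (pvDiffWitness_traverse_fence_py.2) = pvDiffWitnessOut_traverse_fence_py.2 ∧ pvDiffWitnessOut_traverse_fence_py.1 ≠ pvDiffWitnessOut_traverse_fence_py.2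
def Claim_exact_traverse_fence_py : Prop := ∀ (height : Int) (length : Int), Dom_traverse_fence_py height length → D_traverse_fence_py height length → traverse_fence_py height length ≠ traverse_fence_py_alt height length

-- ===== LEMMAS AND PROOFS =====

-- closed-form rail for column c (proof-side mirror of B's formula, with Int.emod)
def pvRail (height c : Int) : Int :=
  if c % (2 * (height - 1)) < height then c % (2 * (height - 1))
  else 2 * (height - 1) - c % (2 * (height - 1))

-- going_down state of A just before processing column n
def pvGd (height : Int) (n : Nat) : Bool :=
  if n = 0 then true else decide (((n : Int) - 1) % (2 * (height - 1)) < height - 1)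

theorem pv_neg_one_emod (c : Int) (hc : 1 < c) : (-1 : Int) % c = c - 1 := by
  have h1 : ((-1 : Int) + c * 1) % c = (-1 : Int) % c := Int.add_mul_emod_self_left (-1) c 1
  have h2 : ((-1 : Int) + c * 1) = c - 1 := by ring
  rw [h2] at h1
  rw [← h1, Int.emod_eq_of_lt (by omega) (by omega)]

theorem pv_succ_emod (n c : Int) (hc : 1 < c) :
    (n + 1) % c = if n % c = c - 1 then 0 else n % c + 1 := by
  have hm : (0 : Int) ≤ n % c := Int.emod_nonneg _ (by omega)
  have hm' : n % c < c := Int.emod_lt_of_pos _ (by omega)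
  have h1 : (n + 1) % c = (n % c + 1 % c) % c := by rw [← Int.add_emod]
  have h2 : (1 : Int) % c = 1 := Int.emod_eq_of_lt (by omega) (by omega)
  rw [h2] at h1
  split_ifs with h
  · rw [h1, h]; simp
  · rw [h1, Int.emod_eq_of_lt (by omega) (by omega)]

theorem pv_pred_emod (n c : Int) (hc : 1 < c) :
    (n - 1) % c = if n % c = 0 then c - 1 else n % c - 1 := by
  have hm : (0 : Int) ≤ n % c := Int.emod_nonneg _ (by omega)
  have hm' : n % c < c := Int.emod_lt_of_pos _ (by omega)
  have h1 : (n - 1) % c = (n % c + (-1) % c) % c := by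
    rw [← Int.add_emod]; ring_nf
  rw [pv_neg_one_emod c hc] at h1
  split_ifs with h
  · rw [h1, h, Int.emod_eq_of_lt (by omega) (by omega)]; ring
  · have h2 : (n % c + (c - 1)) % c = (n % c - 1 + c * 1) % c := by ring_nf
    rw [h1, h2, Int.add_mul_emod_self_left, Int.emod_eq_of_lt (by omega) (by omega)]

-- one step of A's loop, in closed form, for height ≥ 2
theorem pv_step_eq (height : Int) (hh : 2 ≤ height) (n : Nat) (cs : List (Int × Int)) :
    pvStepA height (pvRail height (n : Int), pvGd height n, cs) (n : Int) =
      (pvRail height ((n : Int) + 1), pvGd height (n + 1), cs ++ [(pvRail height (n : Int), (n : Int))]) := by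
  have hc : (1 : Int) < 2 * (height - 1) := by omega
  have hm : (0 : Int) ≤ (n : Int) % (2 * (height - 1)) := Int.emod_nonneg _ (by omega)
  have hm' : (n : Int) % (2 * (height - 1)) < 2 * (height - 1) := Int.emod_lt_of_pos _ (by omega)
  have hsucc := pv_succ_emod (n : Int) (2 * (height - 1)) hc
  have hgdnew : pvGd height (n + 1) = decide ((n : Int) % (2 * (height - 1)) < height - 1) := by
    unfold pvGd
    norm_num
  have hgd : (if pvRail height (n : Int) = 0 then true
      else if pvRail height (n : Int) = height - 1 then false else pvGd height n) =
      decide ((n : Int) % (2 * (height - 1)) < height - 1) := by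
    by_cases h0 : pvRail height (n : Int) = 0
    · have hp0 : (n : Int) % (2 * (height - 1)) = 0 := by
        unfold pvRail at h0; split_ifs at h0 <;> omega
      rw [if_pos h0, hp0]
      simp
      omega
    · by_cases hH : pvRail height (n : Int) = height - 1
      · have hph : (n : Int) % (2 * (height - 1)) = height - 1 := by
          unfold pvRail at hH; split_ifs at hH <;> omega
        rw [if_neg h0, if_pos hH, hph]
        simp
      · rw [if_neg h0, if_neg hH]
        have hn0 : n ≠ 0 := by
          intro h; subst h
          apply h0
          simp only [pvRail, Nat.cast_zero, Int.zero_emod]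
          rw [if_pos (by omega)]
        have hpne : (n : Int) % (2 * (height - 1)) ≠ 0 := by
          intro hp; apply h0
          simp only [pvRail, hp]
          rw [if_pos (by omega)]
        have hpred := pv_pred_emod (n : Int) (2 * (height - 1)) hc
        rw [if_neg hpne] at hpred
        simp only [pvGd, hn0, if_false, hpred]
        have hrail := hH
        unfold pvRail at hrail
        simp only [decide_eq_decide]
        split_ifs at hrail <;> omega
  have hrailnew : pvRail height (n : Int) +
      (if decide ((n : Int) % (2 * (height - 1)) < height - 1) = true then 1 else -1) =
      pvRail height ((n : Int) + 1) := by
    simp only [pvRail, hsucc, decide_eq_true_eq]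
    split_ifs <;> omega
  simp only [pvStepA, hgd, hgdnew, hrailnew]

-- A's loop invariant for height ≥ 2
theorem pv_loopA (height : Int) (hh : 2 ≤ height) (n : Nat) :
    (PySem.List.pyRange 0 (n : Int) 1).foldl (pvStepA height) (0, true, []) =
      (pvRail height (n : Int), pvGd height n,
        (PySem.List.pyRange 0 (n : Int) 1).map (fun c => (pvRail height c, c))) := by
  induction n with
  | zero =>
      rw [PySem.List.pyRange_one_eq_nil (by omega)]
      simp only [List.foldl_nil, List.map_nil, Nat.cast_zero]
      have h0 : (0 : Int) % (2 * (height - 1)) = 0 := Int.zero_emod _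
      simp [pvRail, pvGd, h0, show (0 : Int) < height by omega]
  | succ m ih =>
      have hr : PySem.List.pyRange 0 ((m : Int) + 1) 1 =
          PySem.List.pyRange 0 (m : Int) 1 ++ [(m : Int)] :=
        PySem.List.pyRange_one_succ_right (by omega)
      push_cast
      rw [hr, List.foldl_append, List.map_append, ih]
      simp only [List.foldl_cons, List.foldl_nil, List.map_cons, List.map_nil]
      rw [pv_step_eq height hh m]

-- A's behaviour when height ≤ 1: rail = col forever
theorem pv_loopA_low (height : Int) (hh : height ≤ 1) (n : Nat) :
    (PySem.List.pyRange 0 (n : Int) 1).foldl (pvStepA height) (0, true, []) =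
      ((n : Int), true, (PySem.List.pyRange 0 (n : Int) 1).map (fun c => (c, c))) := by
  induction n with
  | zero =>
      rw [PySem.List.pyRange_one_eq_nil (by omega)]
      simp
  | succ m ih =>
      have hr : PySem.List.pyRange 0 ((m : Int) + 1) 1 =
          PySem.List.pyRange 0 (m : Int) 1 ++ [(m : Int)] :=
        PySem.List.pyRange_one_succ_right (by omega)
      push_cast
      rw [hr, List.foldl_append, List.map_append, ih]
      simp only [List.foldl_cons, List.foldl_nil, List.map_cons, List.map_nil]
      have hgd : (if (m : Int) = 0 then true
          else if (m : Int) = height - 1 then false else true) = true := by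
        split_ifs with h1 h2 <;> first | rfl | omega
      simp only [pvStepA, hgd, if_true]

theorem pv_A_eq_map_low (height length : Int) (hh : height ≤ 1) :
    traverse_fence_py height length =
      (PySem.List.pyRange 0 length 1).map (fun c => (c, c)) := by
  unfold traverse_fence_py
  rcases le_or_gt length 0 with hl | hl
  · rw [PySem.List.pyRange_one_eq_nil hl]; simp
  · have hlen : length = ((length.toNat : Nat) : Int) := by omega
    rw [hlen, pv_loopA_low height hh]

theorem pv_A_eq_B_high (height length : Int) (hh : 2 ≤ height) :
    traverse_fence_py height length = traverse_fence_py_alt height length := by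
  unfold traverse_fence_py traverse_fence_py_alt
  have hns : ¬ height ≤ 1 := by omega
  rw [if_neg hns]
  have hmod : ∀ a : Int, PySem.Int.mod a (2 * (height - 1)) = a % (2 * (height - 1)) :=
    fun a => PySem.Int.mod_eq_emod_of_pos (by omega)
  rcases le_or_gt length 0 with hl | hl
  · rw [PySem.List.pyRange_one_eq_nil hl]; simp
  · have hlen : length = ((length.toNat : Nat) : Int) := by omega
    rw [hlen, pv_loopA height hh]
    simp only [hmod, pvRail]

-- ===== VERDICT (by name: the statement is the Claim_ definition above) =====
theorem traverse_fence_py_spec : Claim_unchanged_traverse_fence_py := by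
  intro height length _ hnd
  rcases le_or_gt height 1 with hh | hh
  · have hl : length ≤ 1 := by
      by_contra h
      exact hnd ⟨hh, by omega⟩
    rw [pv_A_eq_map_low height length hh]
    unfold traverse_fence_py_alt
    rw [if_pos hh]
    rcases le_or_gt length 0 with hl0 | hl0
    · rw [PySem.List.pyRange_one_eq_nil hl0]; simp
    · have hl1 : length = 1 := by omega
      subst hl1
      have hone : PySem.List.pyRange 0 1 1 = [0] := by decide
      rw [hone]
      simp
  · exact pv_A_eq_B_high height length (by omega)

theorem traverse_fence_py_changed : Claim_changed_traverse_fence_py := by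
  unfold Claim_changed_traverse_fence_py; decide

theorem traverse_fence_py_tight : Claim_exact_traverse_fence_py := by
  intro height length _ hd heq
  obtain ⟨hh, hl⟩ := hd
  have hA := pv_A_eq_map_low height length hh
  have hB : traverse_fence_py_alt height length =
      (PySem.List.pyRange 0 length 1).map (fun col => ((0 : Int), col)) := by
    unfold traverse_fence_py_alt; rw [if_pos hh]
  rw [hA, hB] at heq
  have hlen : length = ((length.toNat : Nat) : Int) := by omega
  rw [hlen] at heq
  have h1 := congrArg (fun xs : List (Int × Int) => xs[1]?) heq
  simp only at h1
  rw [PySem.List.getElem?_map_pyRange_zero _ length.toNat 1 (by omega),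
      PySem.List.getElem?_map_pyRange_zero _ length.toNat 1 (by omega)] at h1
  simp at h1
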